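-- pv_equiv track=rewrite | github.com/vodobryshkin/ITMO | 1 Курс/Информатика/Лабораторная №4/json_tools/json_tools.py | yaml_type
-- ===== SOURCE A (Python) =====
-- def define_type(s):
--     if s[0] == "{" and s[-1] == "}":  # Фигурные скобки указывают на то, что в структуру вложена структура
--         return "structure"
--     elif s[0] == "[" and s[-1] == "]":  # Квадратные скобки указывают на то, что в структуру вложен массив
--         return "array"
--     elif s[0] == s[-1] == '"':  # Кавычки указывают на то, что в структуру вложена строка
--         if ':' in s:  # В данном случае нужно будет окружить строку одинарными кавычками
--             return "digit-string"
--         return "string"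
--     return "digit"
--
-- def yaml_type(s, array_tab="  ", self_tab=""):
--     object_type = define_type(s)
--     if object_type == "string":
--         return s[1:len(s) - 1]
--     if object_type == "digit":
--         return s
--     if object_type == "digit-string":
--         return f"'{s[1:len(s) - 1]}'"
--     if object_type == "array":
--         res = ""
--         sub_str = ""
--         br_su = False
--         br_sch = 0
--         s = s[1:len(s) - 1] + ','
--         first_arr = True
--         for i in range(len(s)):
--             if s[i] == '[':
--                 br_sch += 1
--                 br_su = True
--             if s[i] == ']':
--                 br_sch -= 1
--             if br_sch == 0:
--                 br_su = False
--
--             if s[i] == "," and not br_su: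
--                 if first_arr and array_tab != "  ":
--                     res += self_tab + '- ' + yaml_type(sub_str.strip(), array_tab + '  ') + '\n'
--                     first_arr = False
--                 else:
--                     res += array_tab + '- ' + yaml_type(sub_str.strip(), array_tab + '  ') + '\n'
--                 sub_str = ""
--             else:
--                 sub_str += s[i]
--
--         return res[:-1]
--     return ""
-- ===== SOURCE B (Python) =====
-- def _pieces(body):
--     # Tokenize body + ',' by recording the INDEX of every top-level comma
--     # (depth tracked with '[' / ']' only), then cut the segments out by slicing.
--     body2 = body + ","
--     cuts = []
--     depth = 0
--     inside = False
--     for i, ch in enumerate(body2):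
--         if ch == "," and not inside:
--             cuts.append(i)
--         else:
--             if ch == "[":
--                 depth += 1
--                 inside = True
--             elif ch == "]":
--                 depth -= 1
--             if depth == 0:
--                 inside = False
--     pieces = []
--     prev = -1
--     for c in cuts:
--         pieces.append(body2[prev + 1 : c])
--         prev = c
--     return pieces
--
-- def yaml_type(s, array_tab="  ", self_tab=""):
--     # Iterative: an explicit LIFO worklist of pending values / literal pieces
--     # replaces A's recursion; output is collected flat and joined once.
--     out = []
--     stack = [(s, array_tab, self_tab)]
--     while stack:
--         item = stack.pop()
--         if isinstance(item, str):
--             out.append(item)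
--             continue
--         seg, atab, stab = item
--         first, last = seg[0], seg[-1]
--         if first == "{" and last == "}":
--             continue
--         if first == "[" and last == "]":
--             work = []
--             for i, piece in enumerate(_pieces(seg[1:len(seg) - 1])):
--                 if i > 0:
--                     work.append("\n")
--                 work.append((stab if i == 0 and atab != "  " else atab) + "- ")
--                 work.append((piece.strip(), atab + "  ", ""))
--             stack.extend(reversed(work))
--             continue
--         if first == last == '"':
--             inner = seg[1:len(seg) - 1]
--             out.append("'" + inner + "'" if ":" in seg else inner)
--         else:
--             out.append(seg)
--     return "".join(out)
-- ===== Notes on version B (the rewrite author's own statement) =====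
-- stated objective: alternative
-- what changed: A is recursive with one fused loop per array that scans characters, tracks depth and appends formatted text in the same pass; B is iterative: an explicit LIFO worklist of pending values and literal pieces replaces the recursion, the array body is tokenized by recording top-level comma indices and slicing the segments out, and the output is collected as a flat list of pieces joined once at the end.
import Mathlib
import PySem

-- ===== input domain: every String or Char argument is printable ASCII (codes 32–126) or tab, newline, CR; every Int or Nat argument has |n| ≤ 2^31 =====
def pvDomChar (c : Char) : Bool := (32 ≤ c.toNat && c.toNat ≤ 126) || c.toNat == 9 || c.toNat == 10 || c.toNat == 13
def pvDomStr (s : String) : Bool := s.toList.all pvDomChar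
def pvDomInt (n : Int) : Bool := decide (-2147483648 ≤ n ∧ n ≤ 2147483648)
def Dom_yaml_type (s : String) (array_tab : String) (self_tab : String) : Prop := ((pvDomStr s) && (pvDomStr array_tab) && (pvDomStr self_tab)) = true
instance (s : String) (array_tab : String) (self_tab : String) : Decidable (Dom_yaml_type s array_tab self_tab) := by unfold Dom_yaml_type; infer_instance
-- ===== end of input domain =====

-- B replaces A's recursion + fused scan-and-emit array loop with an iterative explicit
-- worklist: array bodies are tokenized by top-level comma indices and sliced, and the
-- output is collected as flat pieces joined once; same return value ('alternative').

-- ===== PORT A =====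
-- define_type(s) on a nonempty string (the empty string makes Python raise; handled by the caller)
def defineTypeA (c : Char) (rest : List Char) : String :=
  let last := (c :: rest).getLast (List.cons_ne_nil c rest)
  if c = '{' ∧ last = '}' then "structure"
  else if c = '[' ∧ last = ']' then "array"
  else if c = '"' ∧ last = '"' then
    (if PySem.Chars.isIn [':'] (c :: rest) then "digit-string" else "string")
  else "digit"

-- fuel makes the recursion structural; it is always sufficient (each recursive call is on a
-- strictly shorter string), so the port computes exactly what the Python computes.
mutual
-- the `for i in range(len(s))` loop of the array branch, state threaded exactly as in A
def loopA (f : Nat) (t : List Char) (res sub : List Char) (br_su : Bool) (br_sch : Int)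
    (first : Bool) (atab stab : List Char) : List Char :=
  match t with
  | [] => res
  | c :: cs =>
    let br_sch1 := if c = '[' then br_sch + 1 else br_sch
    let br_su1  := if c = '[' then true else br_su
    let br_sch2 := if c = ']' then br_sch1 - 1 else br_sch1
    let br_su2  := if br_sch2 = 0 then false else br_su1
    if c = ',' ∧ br_su2 = false then
      let line := (if first = true ∧ atab ≠ [' ', ' '] then stab else atab) ++ ['-', ' ']
                    ++ goA f (PySem.Chars.strip sub) (atab ++ [' ', ' ']) [] ++ ['\n']
      loopA f cs (res ++ line) [] br_su2 br_sch2
        (if first = true ∧ atab ≠ [' ', ' '] then false else first) atab stab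
    else
      loopA f cs res (sub ++ [c]) br_su2 br_sch2 first atab stab
termination_by (f, 1, t.length)

def goA (f : Nat) (l : List Char) (atab stab : List Char) : List Char :=
  match f, l with
  | 0, _ => []            -- fuel guard only; never reached from yaml_type
  | _, [] => []           -- Python raises IndexError in define_type here (outside Pre_)
  | f + 1, c :: rest =>
    let ot := defineTypeA c rest
    if ot = "string" then
      PySem.List.slice (c :: rest) (some 1) (some (PySem.List.len (c :: rest) - 1))
    else if ot = "digit" then c :: rest
    else if ot = "digit-string" then
      '\'' :: PySem.List.slice (c :: rest) (some 1) (some (PySem.List.len (c :: rest) - 1)) ++ ['\'']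
    else if ot = "array" then
      let t := PySem.List.slice (c :: rest) (some 1) (some (PySem.List.len (c :: rest) - 1)) ++ [',']
      PySem.List.slice (loopA f t [] [] false 0 true atab stab) none (some (-1))
    else []
termination_by (f, 0, 0)
end

def yaml_type (s : String) (array_tab : String) (self_tab : String) : String :=
  (goA (s.toList.length + 1) s.toList array_tab.toList self_tab.toList)
    |> String.ofList

-- ===== PORT B =====
-- Source B `_pieces`, first loop: record the index of every top-level comma of body + ','
def cutsGo (l : List Char) (i : Int) (cuts : List Int) (d : Int) (ins : Bool) : List Int :=
  match l with
  | [] => cuts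
  | ch :: t =>
    if ch = ',' ∧ ins = false then cutsGo t (i + 1) (cuts ++ [i]) d ins
    else
      let d' := if ch = '[' then d + 1 else if ch = ']' then d - 1 else d
      let ins' := if ch = '[' then true else ins
      let ins'' := if d' = 0 then false else ins'
      cutsGo t (i + 1) cuts d' ins''

-- Source B `_pieces`, second loop: cut the segments out by slicing between the comma indices
def segsFromCuts (body2 : List Char) (cuts : List Int) (prev : Int) : List (List Char) :=
  match cuts with
  | [] => []
  | c :: t => PySem.List.slice body2 (some (prev + 1)) (some c) :: segsFromCuts body2 t c

def piecesB (body : List Char) : List (List Char) :=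
  segsFromCuts (body ++ [',']) (cutsGo (body ++ [',']) 0 [] 0 false) (-1)

-- a worklist item: a literal output piece (inl) or a pending value with its tabs (inr)
abbrev ItemB := List Char ⊕ (List Char × List Char × List Char)

-- the inner `for i, piece in enumerate(...)` loop building the work list of an array
def buildWork (atab stab : List Char) (i : Nat) (ps : List (List Char)) : List ItemB :=
  match ps with
  | [] => []
  | p :: rest =>
    (if 0 < i then [Sum.inl ['\n']] else [])
      ++ [Sum.inl ((if i = 0 ∧ atab ≠ [' ', ' '] then stab else atab) ++ ['-', ' ']),
          Sum.inr (PySem.Chars.strip p, atab ++ [' ', ' '], ([] : List Char))]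
      ++ buildWork atab stab (i + 1) rest

-- the `while stack:` loop; head of the list = top of the stack (pop / extend(reversed(..)));
-- fuel only makes the loop total, 3*len+1 always suffices
def runB (fuel : Nat) (stack : List ItemB) (out : List Char) : List Char :=
  match fuel with
  | 0 => out
  | f + 1 =>
    match stack with
    | [] => out
    | Sum.inl lit :: rest => runB f rest (out ++ lit)
    | Sum.inr (seg, atab, stab) :: rest =>
      match seg with
      | [] => runB f rest out      -- Python raises IndexError here (outside Pre_)
      | c :: cs =>
        let last := (c :: cs).getLast (List.cons_ne_nil c cs)
        if c = '{' ∧ last = '}' then runB f rest out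
        else if c = '[' ∧ last = ']' then
          runB f (buildWork atab stab 0
            (piecesB (PySem.List.slice (c :: cs) (some 1) (some (PySem.List.len (c :: cs) - 1)))) ++ rest) out
        else if c = '"' ∧ last = '"' then
          let inner := PySem.List.slice (c :: cs) (some 1) (some (PySem.List.len (c :: cs) - 1))
          runB f rest (out ++ (if PySem.Chars.isIn [':'] (c :: cs) then '\'' :: inner ++ ['\''] else inner))
        else runB f rest (out ++ (c :: cs))

def yaml_type_alt (s : String) (array_tab : String) (self_tab : String) : String :=
  String.ofList (runB (3 * s.toList.length + 1)
    [Sum.inr (s.toList, array_tab.toList, self_tab.toList)] [])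

-- ===== PRECONDITION & SPEC =====
-- Pre_'s own top-level segmentation of an array body (a single foldl; independent of the ports)
def pvSegs (body : List Char) : List (List Char) :=
  ((body ++ [',']).foldl
    (fun (st : List (List Char) × List Char × Int × Bool) c =>
      let (acc, cur, d, ins) := st
      if c = ',' ∧ ins = false then (acc ++ [cur], [], d, ins)
      else
        let d' := if c = '[' then d + 1 else if c = ']' then d - 1 else d
        (acc, cur ++ [c], d', if d' = 0 then false else (if c = '[' then true else ins)))
    ([], [], 0, false)).1

-- grammar of the values the Python accepts without raising: nonempty, and inside an
-- array-shaped value every stripped top-level segment is again such a value.  The Nat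
-- argument only bounds the nesting depth (each level loses at least two characters, so
-- s.length always suffices); it is not part of the condition.
def wfA : Nat → List Char → Bool
  | _, [] => false
  | 0, _ :: _ => false
  | d + 1, c :: rest =>
    if c = '[' ∧ (c :: rest).getLast (List.cons_ne_nil c rest) = ']' then
      (pvSegs ((c :: rest).tail.dropLast)).all (fun seg => wfA d (PySem.Chars.strip seg))
    else true

-- Pre_ excludes exactly the inputs on which the Python raises IndexError: the value (or,
-- recursively, some stripped top-level segment of an array value) is the empty string.
def Pre_yaml_type (s : String) (array_tab : String) (self_tab : String) : Prop :=
  wfA s.toList.length s.toList = true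
instance (s : String) (array_tab : String) (self_tab : String) : Decidable (Pre_yaml_type s array_tab self_tab) := by unfold Pre_yaml_type; infer_instance

def pvWitness_yaml_type : String × String × String := ("[1, [2, \"a\"]]", "  ", "")

def Spec_yaml_type (s : String) (array_tab : String) (self_tab : String) (out : String) : Prop := out = yaml_type_alt s array_tab self_tab
instance (s : String) (array_tab : String) (self_tab : String) (out : String) : Decidable (Spec_yaml_type s array_tab self_tab out) := by unfold Spec_yaml_type; infer_instance

-- ===== CLAIM (what is proved, stated in full; the proofs are below) =====
def Claim_equal_yaml_type : Prop := ∀ (s : String) (array_tab : String) (self_tab : String), Dom_yaml_type s array_tab self_tab → Pre_yaml_type s array_tab self_tab → Spec_yaml_type s array_tab self_tab (yaml_type s array_tab self_tab)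

-- ===== LEMMAS AND PROOFS =====

-- proof-only reference splitter: character-accumulating top-level comma split
def splitGo (t : List Char) (segs : List (List Char)) (cur : List Char)
    (depth : Int) (inside : Bool) : List (List Char) :=
  match t with
  | [] => segs
  | c :: cs =>
    if c = ',' ∧ inside = false then
      splitGo cs (segs ++ [cur]) [] depth inside
    else
      let cur' := cur ++ [c]
      let depth' := if c = '[' then depth + 1 else if c = ']' then depth - 1 else depth
      let inside' := if c = '[' then true else inside
      let inside'' := if depth' = 0 then false else inside'
      splitGo cs segs cur' depth' inside''

-- A's flush steps, abstracted over the already-split segment list (first-flag threaded as in A)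
def emitA (f : Nat) (atab stab : List Char) : Bool → List (List Char) → List Char
  | _, [] => []
  | first, seg :: rest =>
    (if first = true ∧ atab ≠ [' ', ' '] then stab else atab) ++ ['-', ' ']
      ++ goA f (PySem.Chars.strip seg) (atab ++ [' ', ' ']) [] ++ ['\n']
      ++ emitA f atab stab (if first = true ∧ atab ≠ [' ', ' '] then false else first) rest

-- denotation of a worklist item / worklist: the text it will contribute to the output
def denoteItem : ItemB → List Char
  | Sum.inl l => l
  | Sum.inr (seg, a, st) => goA (seg.length + 1) seg a st

def denoteL (st : List ItemB) : List Char := st.flatMap denoteItem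

-- fuel cost of a worklist
def costI : ItemB → Nat
  | Sum.inl _ => 1
  | Sum.inr (seg, _, _) => 3 * seg.length + 1

def costL (st : List ItemB) : Nat := (st.map costI).sum

theorem splitGo_acc (t : List Char) : ∀ segs cur d i,
    splitGo t segs cur d i = segs ++ splitGo t [] cur d i := by
  induction t with
  | nil => intro segs cur d i; simp [splitGo]
  | cons c cs ih =>
    intro segs cur d i
    rw [splitGo, splitGo]
    split
    · simp only [List.nil_append]
      rw [ih (segs ++ [cur]), ih [cur]]; simp
    · exact ih segs _ _ _

theorem loopA_emit (f : Nat) (atab stab : List Char) (t : List Char) : ∀ res sub su sch first,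
    (sch = 0 → su = false) →
    loopA f t res sub su sch first atab stab
      = res ++ emitA f atab stab first (splitGo t [] sub sch su) := by
  induction t with
  | nil => intro res sub su sch first _; simp [loopA, splitGo, emitA]
  | cons c cs ih =>
    intro res sub su sch first inv
    have e1 : ((',' : Char) = '[') = False := by simp
    have e2 : ((',' : Char) = ']') = False := by simp
    by_cases hc : c = ','
    · subst hc
      cases su with
      | false =>
        rw [loopA, splitGo]
        simp only [e1, e2, if_false, ite_self, List.nil_append]
        simp only [and_self, if_true]
        rw [splitGo_acc cs [sub], ih _ _ _ _ _ (fun _ => rfl)]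
        simp [emitA, List.append_assoc]
      | true =>
        have hs : sch ≠ 0 := fun h => by simpa using inv h
        rw [loopA, splitGo]
        simp only [e1, e2, if_false, if_neg hs, and_false, Bool.true_eq_false]
        exact ih _ _ _ _ _ (fun h => absurd h hs)
    · rw [loopA, splitGo]
      have hcf : (c = ',') = False := eq_false hc
      simp only [hcf, false_and, if_false]
      have hstate : (if c = ']' then (if c = '[' then sch + 1 else sch) - 1
                      else (if c = '[' then sch + 1 else sch))
          = (if c = '[' then sch + 1 else if c = ']' then sch - 1 else sch) := by
        by_cases hb : c = '['
        · subst hb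
          rw [if_pos rfl, if_pos rfl, if_neg (by decide)]
        · by_cases hk : c = ']'
          · subst hk
            rw [if_pos rfl, if_neg hb, if_neg hb, if_pos rfl]
          · rw [if_neg hk, if_neg hb, if_neg hb, if_neg hk]
      rw [hstate]
      exact ih _ _ _ _ _ (by intro h; rw [if_pos h])


theorem strip_length_le (l : List Char) : (PySem.Chars.strip l).length ≤ l.length := by
  unfold PySem.Chars.strip PySem.Chars.rstrip PySem.Chars.lstrip
  calc ((List.dropWhile PySem.Chars.isspace (List.dropWhile PySem.Chars.isspace l).reverse).reverse).length
      ≤ ((List.dropWhile PySem.Chars.isspace l).reverse).length := by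
        rw [List.length_reverse]; exact List.length_dropWhile_le _ _
    _ ≤ l.length := by rw [List.length_reverse]; exact List.length_dropWhile_le _ _

theorem cutsGo_acc (l : List Char) : ∀ i cuts d ins,
    cutsGo l i cuts d ins = cuts ++ cutsGo l i [] d ins := by
  induction l with
  | nil => intro i cuts d ins; simp [cutsGo]
  | cons c cs ih =>
    intro i cuts d ins
    rw [cutsGo, cutsGo]
    split
    · simp only [List.nil_append]
      rw [ih (i+1) (cuts ++ [i]), ih (i+1) [i]]; simp
    · exact ih _ cuts _ _

theorem splitGo_cost (t : List Char) : ∀ cur d i,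
    ((splitGo t [] cur d i).map (fun s => s.length + 1)).sum ≤ cur.length + t.length := by
  induction t with
  | nil => intro cur d i; simp [splitGo]
  | cons c cs ih =>
    intro cur d i
    rw [splitGo]
    split
    · simp only [List.nil_append]
      rw [splitGo_acc cs [cur]]
      simp only [List.map_append, List.sum_append, List.map_cons, List.map_nil, List.sum_cons,
        List.sum_nil, List.length_cons]
      have := ih [] d i
      simp only [List.length_nil] at this
      omega
    · refine le_trans (ih (cur ++ [c]) _ _) ?_
      simp only [List.length_append, List.length_cons, List.length_nil]
      omega

theorem mem_splitGo_len (t cur : List Char) (d : Int) (i : Bool) (p : List Char)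
    (hp : p ∈ splitGo t [] cur d i) : p.length + 1 ≤ cur.length + t.length := by
  have h1 : p.length + 1 ≤ ((splitGo t [] cur d i).map (fun s => s.length + 1)).sum := by
    exact List.single_le_sum (fun x _ => Nat.zero_le x) _ (List.mem_map_of_mem hp)
  exact le_trans h1 (splitGo_cost t cur d i)

theorem segsFromCuts_cutsGo (l : List Char) : ∀ (pre0 cur : List Char) (d : Int) (ins : Bool),
    segsFromCuts (pre0 ++ cur ++ l) (cutsGo l ((pre0.length : Int) + (cur.length : Int)) [] d ins) ((pre0.length : Int) - 1)
      = splitGo l [] cur d ins := by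
  induction l with
  | nil => intro pre0 cur d ins; simp [cutsGo, segsFromCuts, splitGo]
  | cons ch t ih =>
    intro pre0 cur d ins
    rw [cutsGo, splitGo]
    split
    · -- top-level comma at index |pre0| + |cur|
      rw [cutsGo_acc t]
      simp only [List.nil_append, List.singleton_append]
      rw [segsFromCuts]
      have hsl : PySem.List.slice (pre0 ++ cur ++ ch :: t) (some ((pre0.length : Int) - 1 + 1))
          (some ((pre0.length : Int) + (cur.length : Int))) = cur := by
        have h1 : ((pre0.length : Int) - 1 + 1) = ((pre0.length : Nat) : Int) := by ring
        have h2 : ((pre0.length : Int) + (cur.length : Int)) = (((pre0.length + cur.length : Nat)) : Int) := by push_cast; ring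
        rw [h1, h2, PySem.List.slice_natCast]
        rw [List.append_assoc, List.drop_left, Nat.add_sub_cancel_left, List.take_left]
      rw [hsl]
      rw [splitGo_acc t [cur]]
      have htail : segsFromCuts (pre0 ++ cur ++ ch :: t)
          (cutsGo t ((pre0.length : Int) + (cur.length : Int) + 1) [] d ins)
          ((pre0.length : Int) + (cur.length : Int)) = splitGo t [] [] d ins := by
        have := ih (pre0 ++ cur ++ [ch]) [] d ins
        simp only [List.length_append, List.length_cons, List.length_nil] at this
        have e1 : (pre0 ++ cur ++ [ch]) ++ [] ++ t = pre0 ++ cur ++ ch :: t := by simp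
        have e2 : (((pre0.length + cur.length + 1 : Nat)) : Int) + ((0:Nat) : Int)
            = (pre0.length : Int) + (cur.length : Int) + 1 := by push_cast; ring
        have e3 : (((pre0.length + cur.length + 1 : Nat)) : Int) - 1
            = (pre0.length : Int) + (cur.length : Int) := by push_cast; ring
        rw [e1, e2, e3] at this
        exact this
      rw [htail]
      simp
    · -- ordinary character: it joins the current segment
      have := ih pre0 (cur ++ [ch])
        (if ch = '[' then d + 1 else if ch = ']' then d - 1 else d)
        (if (if ch = '[' then d + 1 else if ch = ']' then d - 1 else d) = 0 then false
         else if ch = '[' then true else ins)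
      have e1 : pre0 ++ (cur ++ [ch]) ++ t = pre0 ++ cur ++ ch :: t := by simp
      have e2 : ((pre0.length : Int) + (((cur ++ [ch]).length : Nat) : Int))
          = (pre0.length : Int) + (cur.length : Int) + 1 := by
        simp only [List.length_append, List.length_cons, List.length_nil]; push_cast; ring
      rw [e1, e2] at this
      exact this

theorem piecesB_eq (body : List Char) :
    piecesB body = splitGo (body ++ [',']) [] [] 0 false := by
  have := segsFromCuts_cutsGo (body ++ [',']) [] [] 0 false
  simpa [piecesB] using this

theorem costL_append (a b : List ItemB) : costL (a ++ b) = costL a + costL b := by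
  simp [costL]

theorem denoteL_append (a b : List ItemB) : denoteL (a ++ b) = denoteL a ++ denoteL b := by
  simp [denoteL]

theorem buildWork_cost (atab stab : List Char) : ∀ (ps : List (List Char)) (i : Nat),
    costL (buildWork atab stab i ps) ≤ 3 * ((ps.map (fun p => p.length + 1)).sum) := by
  intro ps
  induction ps with
  | nil => intro i; simp [buildWork, costL]
  | cons p rest ih =>
    intro i
    rw [buildWork, costL_append, costL_append]
    have h1 : costL (if 0 < i then [Sum.inl ['\n']] else []) ≤ 1 := by
      split <;> simp [costL, costI]
    have h2 : costL [Sum.inl ((if i = 0 ∧ atab ≠ [' ', ' '] then stab else atab) ++ ['-', ' ']),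
        Sum.inr (PySem.Chars.strip p, atab ++ [' ', ' '], ([] : List Char))]
        = 1 + (3 * (PySem.Chars.strip p).length + 1) := by
      simp [costL, costI]
    have h3 := strip_length_le p
    have h4 := ih (i + 1)
    simp only [List.map_cons, List.sum_cons]
    omega

theorem loopA_mono (f : Nat)
    (H : ∀ l a s, l.length ≤ f → goA f l a s = goA (f + 1) l a s) :
    ∀ (t : List Char) res sub su sch first atab stab, sub.length + t.length ≤ f →
      loopA f t res sub su sch first atab stab = loopA (f + 1) t res sub su sch first atab stab := by
  intro t
  induction t with
  | nil => intro res sub su sch first atab stab _; rw [loopA, loopA]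
  | cons c cs ih =>
    intro res sub su sch first atab stab hlen
    simp only [List.length_cons] at hlen
    rw [loopA, loopA]
    by_cases hc : c = ',' ∧ (if (if c = ']' then (if c = '[' then sch + 1 else sch) - 1
          else if c = '[' then sch + 1 else sch) = 0 then false
        else if c = '[' then true else su) = false
    · rw [if_pos hc, if_pos hc, H (PySem.Chars.strip sub) (atab ++ [' ', ' ']) []
        (le_trans (strip_length_le sub) (by omega))]
      refine ih _ _ _ _ _ _ _ ?_
      simp only [List.length_append, List.length_cons, List.length_nil]
      omega
    · rw [if_neg hc, if_neg hc]
      refine ih _ _ _ _ _ _ _ ?_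
      simp only [List.length_append, List.length_cons, List.length_nil]
      omega

theorem goA_mono : ∀ (f : Nat) (l : List Char) (atab stab : List Char), l.length ≤ f →
    goA f l atab stab = goA (f + 1) l atab stab := by
  intro f
  induction f with
  | zero =>
    intro l atab stab hl
    have : l = [] := List.eq_nil_of_length_eq_zero (Nat.le_zero.mp hl)
    subst this; simp [goA]
  | succ f ih =>
    intro l atab stab hl
    cases l with
    | nil => simp [goA]
    | cons c cs =>
      rw [goA, goA]
      simp only []
      by_cases hA : defineTypeA c cs = "array"
      · have hstring : ¬ defineTypeA c cs = "string" := by rw [hA]; decide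
        have hdigit : ¬ defineTypeA c cs = "digit" := by rw [hA]; decide
        have hds : ¬ defineTypeA c cs = "digit-string" := by rw [hA]; decide
        rw [if_neg hstring, if_neg hdigit, if_neg hds, if_pos hA,
          if_neg hstring, if_neg hdigit, if_neg hds, if_pos hA]
        -- the array branch requires a matching ']' at the end, so cs ≠ []
        have hcs : cs ≠ [] := by
          intro hnil
          subst hnil
          rw [defineTypeA] at hA
          simp only [List.getLast_singleton] at hA
          by_cases h1 : c = '{' ∧ c = '}'
          · rw [if_pos h1] at hA; exact absurd hA (by decide)
          · rw [if_neg h1] at hA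
            by_cases h2 : c = '[' ∧ c = ']'
            · obtain ⟨ha, hb⟩ := h2; rw [ha] at hb; exact absurd hb (by decide)
            · rw [if_neg h2] at hA
              by_cases h3 : c = '"' ∧ c = '"'
              · rw [if_pos h3] at hA
                split at hA <;> exact absurd hA (by decide)
              · rw [if_neg h3] at hA; exact absurd hA (by decide)
        have hlen2 : (PySem.List.slice (c :: cs) (some 1) (some (PySem.List.len (c :: cs) - 1)) ++ [',']).length ≤ f := by
          have e : (PySem.List.len (c :: cs) - 1) = ((cs.length : Nat) : Int) := by
            simp [PySem.List.len]
          rw [e]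
          have e2 : ((1:Int)) = (((1:Nat)) : Int) := by norm_num
          rw [e2, PySem.List.slice_natCast]
          simp only [List.length_append, List.length_cons, List.drop_succ_cons, List.drop_zero,
            List.length_take, List.length_nil]
          have : cs.length ≥ 1 := by
            cases cs with
            | nil => exact absurd rfl hcs
            | cons _ _ => simp
          simp only [List.length_cons] at hl
          omega
        rw [loopA_mono f ih _ _ _ _ _ _ _ _ (by simpa using hlen2)]
      · by_cases h1 : defineTypeA c cs = "string"
        · rw [if_pos h1, if_pos h1]
        · rw [if_neg h1, if_neg h1]
          by_cases h2 : defineTypeA c cs = "digit"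
          · rw [if_pos h2, if_pos h2]
          · rw [if_neg h2, if_neg h2]
            by_cases h3 : defineTypeA c cs = "digit-string"
            · rw [if_pos h3, if_pos h3]
            · rw [if_neg h3, if_neg h3, if_neg hA, if_neg hA]

theorem goA_add (k : Nat) : ∀ (f : Nat) (l : List Char) (atab stab : List Char), l.length ≤ f →
    goA f l atab stab = goA (f + k) l atab stab := by
  induction k with
  | zero => intro f l a s _; rfl
  | succ k ih =>
    intro f l a s hl
    rw [ih f l a s hl, goA_mono (f + k) l a s (by omega)]
    rfl

theorem goA_irrel (f1 f2 : Nat) (l : List Char) (atab stab : List Char)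
    (h1 : l.length ≤ f1) (h2 : l.length ≤ f2) :
    goA f1 l atab stab = goA f2 l atab stab := by
  rcases Nat.le_total f1 f2 with h | h
  · have := goA_add (f2 - f1) f1 l atab stab h1
    rwa [Nat.add_sub_cancel' h] at this
  · have := goA_add (f1 - f2) f2 l atab stab h2
    rw [Nat.add_sub_cancel' h] at this
    exact this.symm

theorem denote_buildWork_tail (f : Nat) (atab stab : List Char) :
    ∀ (segs : List (List Char)) (i : Nat) (first : Bool),
      (first = true → atab = [' ', ' ']) →
      (∀ p ∈ segs, goA f (PySem.Chars.strip p) (atab ++ [' ', ' ']) []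
          = goA ((PySem.Chars.strip p).length + 1) (PySem.Chars.strip p) (atab ++ [' ', ' ']) []) →
      '\n' :: emitA f atab stab first segs
        = denoteL (buildWork atab stab (i + 1) segs) ++ ['\n'] := by
  intro segs
  induction segs with
  | nil => intro i first _ _; simp [emitA, buildWork, denoteL]
  | cons p rest ih =>
    intro i first hfirst hAB
    have htab : (if first = true ∧ atab ≠ [' ', ' '] then stab else atab) = atab := by
      by_cases hf : first = true
      · rw [hfirst hf]; simp
      · simp only [hf]; simp
    have htab2 : (if i + 1 = 0 ∧ atab ≠ [' ', ' '] then stab else atab) = atab := by simp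
    have hfirst' : (if first = true ∧ atab ≠ [' ', ' '] then false else first) = true → atab = [' ', ' '] := by
      split
      · intro h; exact absurd h (by decide)
      · exact hfirst
    have E := ih (i + 1) (if first = true ∧ atab ≠ [' ', ' '] then false else first) hfirst'
      (fun q hq => hAB q (by simp [hq]))
    rw [emitA, buildWork, htab, htab2]
    rw [hAB p (by simp)]
    rw [if_pos (Nat.succ_pos i)]
    have hL : '\n' :: (atab ++ ['-', ' ']
          ++ goA ((PySem.Chars.strip p).length + 1) (PySem.Chars.strip p) (atab ++ [' ', ' ']) [] ++ ['\n']
          ++ emitA f atab stab (if first = true ∧ atab ≠ [' ', ' '] then false else first) rest)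
        = ('\n' :: (atab ++ ['-', ' ']
            ++ goA ((PySem.Chars.strip p).length + 1) (PySem.Chars.strip p) (atab ++ [' ', ' ']) []))
          ++ ('\n' :: emitA f atab stab (if first = true ∧ atab ≠ [' ', ' '] then false else first) rest) := by
      simp [List.append_assoc]
    rw [hL, E]
    simp [denoteL, denoteItem, List.append_assoc]

theorem denote_buildWork (f : Nat) (atab stab : List Char) (segs : List (List Char))
    (hAB : ∀ p ∈ segs, goA f (PySem.Chars.strip p) (atab ++ [' ', ' ']) []
        = goA ((PySem.Chars.strip p).length + 1) (PySem.Chars.strip p) (atab ++ [' ', ' ']) []) :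
    (emitA f atab stab true segs).dropLast = denoteL (buildWork atab stab 0 segs) := by
  cases segs with
  | nil => simp [emitA, buildWork, denoteL]
  | cons p rest =>
    have hfirst' : (if true = true ∧ atab ≠ [' ', ' '] then false else true) = true → atab = [' ', ' '] := by
      split
      · intro h; exact absurd h (by decide)
      · intro _
        by_contra hne
        simp [hne] at *
    have htail := denote_buildWork_tail f atab stab rest 0 _ hfirst'
      (fun q hq => hAB q (by simp [hq]))
    rw [emitA, buildWork]
    rw [hAB p (by simp)]
    have hL : (if true = true ∧ atab ≠ [' ', ' '] then stab else atab) ++ ['-', ' ']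
          ++ goA ((PySem.Chars.strip p).length + 1) (PySem.Chars.strip p) (atab ++ [' ', ' ']) [] ++ ['\n']
          ++ emitA f atab stab (if true = true ∧ atab ≠ [' ', ' '] then false else true) rest
        = ((if true = true ∧ atab ≠ [' ', ' '] then stab else atab) ++ ['-', ' ']
            ++ goA ((PySem.Chars.strip p).length + 1) (PySem.Chars.strip p) (atab ++ [' ', ' ']) [])
          ++ ('\n' :: emitA f atab stab (if true = true ∧ atab ≠ [' ', ' '] then false else true) rest) := by
      simp [List.append_assoc]
    rw [hL, htail, ← List.append_assoc, List.dropLast_concat]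
    rw [if_neg (by omega : ¬ (0 : Nat) < 0)]
    simp [denoteL, denoteItem, List.append_assoc]

theorem runB_denote : ∀ (f : Nat) (st : List ItemB) (out : List Char),
    costL st ≤ f → runB f st out = out ++ denoteL st := by
  intro f
  induction f with
  | zero =>
    intro st out hc
    cases st with
    | nil => simp [runB, denoteL]
    | cons x rest =>
      exfalso
      have : 1 ≤ costI x := by cases x with
        | inl l => simp [costI]
        | inr t => obtain ⟨a, b, c⟩ := t; simp [costI]
      simp [costL] at hc
      omega
  | succ f ih =>
    intro st out hc
    cases st with
    | nil => simp [runB, denoteL]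
    | cons x rest =>
      cases x with
      | inl lit =>
        rw [runB]
        have : costL rest ≤ f := by simp [costL, costI] at hc ⊢; omega
        rw [ih rest (out ++ lit) this]
        simp [denoteL, denoteItem, List.append_assoc]
      | inr trip =>
        obtain ⟨seg, atab, stab⟩ := trip
        cases seg with
        | nil =>
          rw [runB]
          have : costL rest ≤ f := by simp [costL, costI] at hc ⊢; omega
          rw [ih rest out this]
          simp [denoteL, denoteItem, goA]
        | cons c cs =>
          have hrest : costL rest ≤ f := by
            simp [costL, costI] at hc ⊢; omega
          rw [runB]
          simp only []
          have hden : denoteItem (Sum.inr (c :: cs, atab, stab))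
              = goA (cs.length + 1 + 1) (c :: cs) atab stab := by
            simp [denoteItem]
          by_cases h1 : c = '{' ∧ (c :: cs).getLast (List.cons_ne_nil c cs) = '}'
          · rw [if_pos h1, ih rest out hrest]
            have hot : defineTypeA c cs = "structure" := by rw [defineTypeA, if_pos h1]
            have : denoteItem (Sum.inr (c :: cs, atab, stab)) = [] := by
              rw [hden, goA]
              simp only []
              rw [hot, if_neg (by decide), if_neg (by decide), if_neg (by decide), if_neg (by decide)]
            simp [denoteL, this]
          · rw [if_neg h1]
            by_cases h2 : c = '[' ∧ (c :: cs).getLast (List.cons_ne_nil c cs) = ']'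
            · rw [if_pos h2]
              have hot : defineTypeA c cs = "array" := by
                rw [defineTypeA, if_neg h1, if_pos h2]
              have hcs : cs ≠ [] := by
                intro hnil; subst hnil
                obtain ⟨ha, hb⟩ := h2
                simp only [List.getLast_singleton] at hb
                rw [ha] at hb; exact absurd hb (by decide)
              -- the body slice and its length bound
              set body := PySem.List.slice (c :: cs) (some 1) (some (PySem.List.len (c :: cs) - 1)) with hbody
              have hbl : body.length ≤ cs.length - 1 := by
                rw [hbody]
                have e : (PySem.List.len (c :: cs) - 1) = ((cs.length : Nat) : Int) := by
                  simp [PySem.List.len]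
                have e2 : ((1:Int)) = (((1:Nat)) : Int) := by norm_num
                rw [e, e2, PySem.List.slice_natCast]
                simp
              have hcs1 : 1 ≤ cs.length := by
                cases cs with
                | nil => exact absurd rfl hcs
                | cons _ _ => simp
              -- the segments
              set segs := splitGo (body ++ [',']) [] [] 0 false with hsegs
              have hmem : ∀ p ∈ segs, p.length + 1 ≤ body.length + 1 := by
                intro p hp
                have := mem_splitGo_len (body ++ [',']) [] 0 false p (hsegs ▸ hp)
                simpa using this
              -- cost of the generated work
              have hwcost : costL (buildWork atab stab 0 (piecesB body)) ≤ 3 * (body.length + 1) := by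
                rw [piecesB_eq, ← hsegs]
                refine le_trans (buildWork_cost atab stab segs 0) ?_
                have hsum := splitGo_cost (body ++ [',']) [] 0 false
                simp only [List.length_nil, List.length_append, List.length_cons,
                  List.length_nil, Nat.zero_add] at hsum
                rw [← hsegs] at hsum
                omega
              have hctot : costL (buildWork atab stab 0 (piecesB body) ++ rest) ≤ f := by
                rw [costL_append]
                have h5 : costL (Sum.inr ((c :: cs : List Char), atab, stab) :: rest)
                    = 3 * cs.length + 4 + costL rest := by
                  simp only [costL, List.map_cons, List.sum_cons, costI, List.length_cons]
                  omega
                rw [h5] at hc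
                omega
              rw [ih _ out hctot, denoteL_append]
              -- now compute denoteItem on the array value
              have hAB : ∀ p ∈ segs, goA (cs.length + 1) (PySem.Chars.strip p) (atab ++ [' ', ' ']) []
                  = goA ((PySem.Chars.strip p).length + 1) (PySem.Chars.strip p) (atab ++ [' ', ' ']) [] := by
                intro p hp
                apply goA_irrel
                · have := hmem p hp
                  have := strip_length_le p
                  omega
                · omega
              have harr : denoteItem (Sum.inr (c :: cs, atab, stab))
                  = denoteL (buildWork atab stab 0 (piecesB body)) := by
                rw [hden, goA]
                simp only []
                rw [hot, if_neg (by decide), if_neg (by decide), if_neg (by decide), if_pos rfl]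
                rw [← hbody]
                rw [loopA_emit (cs.length + 1) atab stab (body ++ [',']) [] [] false 0 true (fun _ => rfl)]
                rw [List.nil_append, PySem.List.slice_to_neg_one, ← hsegs]
                rw [piecesB_eq, ← hsegs]
                exact denote_buildWork (cs.length + 1) atab stab segs hAB
              rw [← harr]
              simp [denoteL, List.append_assoc]
            · rw [if_neg h2]
              by_cases h3 : c = '"' ∧ (c :: cs).getLast (List.cons_ne_nil c cs) = '"'
              · rw [if_pos h3, ih rest _ hrest]
                by_cases h4 : PySem.Chars.isIn [':'] (c :: cs) = true
                · have hot : defineTypeA c cs = "digit-string" := by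
                    rw [defineTypeA, if_neg h1, if_neg h2, if_pos h3, if_pos h4]
                  have : denoteItem (Sum.inr (c :: cs, atab, stab))
                      = '\'' :: PySem.List.slice (c :: cs) (some 1) (some (PySem.List.len (c :: cs) - 1)) ++ ['\''] := by
                    rw [hden, goA]
                    simp only []
                    rw [hot, if_neg (by decide), if_neg (by decide), if_pos rfl]
                  rw [if_pos h4]
                  simp [denoteL, this, List.append_assoc]
                · have hot : defineTypeA c cs = "string" := by
                    rw [defineTypeA, if_neg h1, if_neg h2, if_pos h3, if_neg (by simpa using h4)]
                  have : denoteItem (Sum.inr (c :: cs, atab, stab))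
                      = PySem.List.slice (c :: cs) (some 1) (some (PySem.List.len (c :: cs) - 1)) := by
                    rw [hden, goA]
                    simp only []
                    rw [hot, if_pos rfl]
                  rw [if_neg (by simpa using h4)]
                  simp [denoteL, this, List.append_assoc]
              · rw [if_neg h3, ih rest _ hrest]
                have hot : defineTypeA c cs = "digit" := by
                  rw [defineTypeA, if_neg h1, if_neg h2, if_neg h3]
                have : denoteItem (Sum.inr (c :: cs, atab, stab)) = c :: cs := by
                  rw [hden, goA]
                  simp only []
                  rw [hot, if_neg (by decide), if_pos rfl]
                simp [denoteL, this]

-- ===== VERDICT (by name: the statement is the Claim_ definition above) =====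
theorem yaml_type_spec : Claim_equal_yaml_type := by
  intro s atab stab _ _
  unfold Spec_yaml_type yaml_type yaml_type_alt
  rw [runB_denote (3 * s.toList.length + 1) _ [] (by simp [costL, costI])]
  simp [denoteL, denoteItem]
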